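-- pv_equiv track=rewrite | github.com/jerrypxl/python | Lab 01/lab01_functions.py | statement
-- ===== SOURCE A (Python) =====
-- def statement(LTransactions):
--     totalWithdrawals = []
--     totalDeposits = []
--     for i in range (0, len(LTransactions)):
--         if LTransactions[i] < 0:
--             totalWithdrawals.append(LTransactions[i])
--         elif LTransactions[i] > 0:
--             totalDeposits.append(LTransactions[i])
--     return [sum(totalWithdrawals), sum(totalDeposits)]
-- ===== SOURCE B (Python) =====
-- def statement(LTransactions):
--     total = sum(LTransactions)
--     magnitude = sum(abs(t) for t in LTransactions)
--     return [(total - magnitude) // 2, (total + magnitude) // 2]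
-- ===== Notes on version B (the rewrite author's own statement) =====
-- stated objective: simpler
-- what changed: Replaces the sign-branching build-two-lists-then-sum with branch-free arithmetic: from the total S and the sum of absolute values M, withdrawals = (S-M)//2 and deposits = (S+M)//2 (exact since each element contributes 2t or 0 to S±M).
import Mathlib
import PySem

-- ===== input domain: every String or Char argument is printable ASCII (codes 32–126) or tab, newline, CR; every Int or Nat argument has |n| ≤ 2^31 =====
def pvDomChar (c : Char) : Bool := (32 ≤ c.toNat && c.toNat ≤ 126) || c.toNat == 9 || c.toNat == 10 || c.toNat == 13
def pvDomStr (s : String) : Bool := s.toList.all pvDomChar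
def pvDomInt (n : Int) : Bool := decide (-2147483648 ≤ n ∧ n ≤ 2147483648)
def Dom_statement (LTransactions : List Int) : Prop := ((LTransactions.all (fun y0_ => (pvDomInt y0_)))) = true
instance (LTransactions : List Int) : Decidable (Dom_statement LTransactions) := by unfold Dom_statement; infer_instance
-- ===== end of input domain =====

-- B replaces A's sign-branching build-two-lists-then-sum with branch-free arithmetic on the total
-- and the sum of absolute values: withdrawals = (S-M)//2, deposits = (S+M)//2 (simpler; same O(n)).
-- ===== PORT A =====
-- Port of A: index loop over range(0, len) building two lists, then [sum, sum].
-- LTransactions[i] is always in range here, so pyGetD with default 0 is exact.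
def statement (LTransactions : List Int) : List Int :=
  let acc := (PySem.List.pyRange 0 (PySem.List.len LTransactions) 1).foldl
    (fun (acc : List Int × List Int) i =>
      let x := PySem.List.pyGetD LTransactions i 0
      if x < 0 then (acc.1 ++ [x], acc.2)
      else if x > 0 then (acc.1, acc.2 ++ [x])
      else acc) ([], [])
  [acc.1.sum, acc.2.sum]

-- ===== PORT B =====
-- Port of B: total = sum(L); magnitude = sum(abs(t) for t in L); arithmetic with Python floor division.
def statement_alt (LTransactions : List Int) : List Int :=
  let total := LTransactions.foldl (· + ·) 0
  let magnitude := LTransactions.foldl (fun a t => a + |t|) 0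
  [PySem.Int.floordiv (total - magnitude) 2, PySem.Int.floordiv (total + magnitude) 2]

-- ===== PRECONDITION & SPEC =====
def Spec_statement (LTransactions : List Int) (out : List Int) : Prop := out = statement_alt LTransactions
instance (LTransactions : List Int) (out : List Int) : Decidable (Spec_statement LTransactions out) := by unfold Spec_statement; infer_instance

-- ===== CLAIM =====
def Claim_equal_statement : Prop := ∀ (LTransactions : List Int), Dom_statement LTransactions → Spec_statement LTransactions (statement LTransactions)

-- ===== LEMMAS AND PROOFS =====

-- A's fold characterised: the two list accumulators end as the negatives resp. positives appended.
lemma statement_inv (xs : List Int) (l1 l2 : List Int) :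
    xs.foldl
      (fun (acc : List Int × List Int) x =>
        if x < 0 then (acc.1 ++ [x], acc.2)
        else if x > 0 then (acc.1, acc.2 ++ [x])
        else acc) (l1, l2) =
    (l1 ++ xs.filter (· < 0), l2 ++ xs.filter (0 < ·)) := by
  induction xs generalizing l1 l2 with
  | nil => simp
  | cons x xs ih =>
    simp only [List.foldl_cons]
    split_ifs with h1 h2
    · rw [ih]; simp [List.filter_cons, h1, show ¬ (0 < x) by omega]
    · rw [ih]; simp [List.filter_cons, h2, h1]
    · rw [ih]; simp [List.filter_cons, h1, show ¬ (0 < x) by omega]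

-- fold with any starting accumulator = init + fold from 0 (for a + f t steps)
lemma foldl_add_shift (f : Int → Int) (xs : List Int) (init : Int) :
    xs.foldl (fun a t => a + f t) init = init + xs.foldl (fun a t => a + f t) 0 := by
  induction xs generalizing init with
  | nil => simp
  | cons y ys ihy => rw [List.foldl_cons, List.foldl_cons, ihy, ihy (0 + f y)]; ring

lemma sum_split (xs : List Int) :
    xs.foldl (· + ·) 0 = (xs.filter (· < 0)).sum + (xs.filter (0 < ·)).sum := by
  induction xs with
  | nil => simp
  | cons x xs ih =>
    rw [List.foldl_cons]
    rw [show (· + · : Int → Int → Int) = (fun a t => a + id t) from rfl, foldl_add_shift]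
    by_cases h1 : x < 0
    · simp [List.filter_cons, h1, show ¬ (0 < x) by omega, ih]; ring
    · by_cases h2 : 0 < x
      · simp [List.filter_cons, h1, h2, ih]; ring
      · have hx : x = 0 := by omega
        simp [List.filter_cons, h1, h2, ih, hx]

lemma abs_split (xs : List Int) :
    xs.foldl (fun a t => a + |t|) 0 = (xs.filter (0 < ·)).sum - (xs.filter (· < 0)).sum := by
  induction xs with
  | nil => simp
  | cons x xs ih =>
    rw [List.foldl_cons, foldl_add_shift (fun t => |t|)]
    by_cases h1 : x < 0
    · simp [List.filter_cons, h1, show ¬ (0 < x) by omega, ih, abs_of_neg h1]; ring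
    · by_cases h2 : 0 < x
      · simp [List.filter_cons, h1, h2, ih, abs_of_pos h2]; ring
      · have hx : x = 0 := by omega
        simp [List.filter_cons, h1, h2, ih, hx]

lemma fdiv_two_mul (k : Int) : PySem.Int.floordiv (2 * k) 2 = k := by
  rw [PySem.Int.floordiv_eq_ediv_of_pos (by norm_num)]
  omega

-- ===== VERDICT =====
theorem statement_spec : Claim_equal_statement := by
  intro xs _
  unfold Spec_statement statement statement_alt
  simp only []
  rw [PySem.List.foldl_pyRange_zero_pyGetD xs 0
    (fun (acc : List Int × List Int) x =>
      if x < 0 then (acc.1 ++ [x], acc.2)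
      else if x > 0 then (acc.1, acc.2 ++ [x])
      else acc) ([], [])]
  rw [statement_inv xs [] []]
  rw [sum_split, abs_split]
  simp only [List.nil_append]
  have h1 : (xs.filter (· < 0)).sum + (xs.filter (0 < ·)).sum -
      ((xs.filter (0 < ·)).sum - (xs.filter (· < 0)).sum) = 2 * (xs.filter (· < 0)).sum := by ring
  have h2 : (xs.filter (· < 0)).sum + (xs.filter (0 < ·)).sum +
      ((xs.filter (0 < ·)).sum - (xs.filter (· < 0)).sum) = 2 * (xs.filter (0 < ·)).sum := by ring
  rw [h1, h2, fdiv_two_mul, fdiv_two_mul]
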